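-- pv_equiv track=rewrite | github.com/jerryli18/PyDev-Package | apt_carrotboxes/src/CarrotBoxes.py | theIndex
-- ===== SOURCE A (Python) =====
-- def theIndex(carrots,amount):
--     """
--     carrots is list of integers representing
--     boxes of carrots, amount is int value.
--     return int that is the index/box number
--     of the box from which the last of
--     amount carrots are eaten
--     """
--     for a in range(1, amount):
--         mostcarrots = carrots.index(max(carrots))
--         carrots[mostcarrots] = carrots[mostcarrots] - 1
--     for a in range(amount, amount + 1):
--         mostcarrots = carrots.index(max(carrots))
--         carrots[mostcarrots] = carrots[mostcarrots] - 1
--     return mostcarrots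
-- ===== SOURCE B (Python) =====
-- def theIndex(carrots, amount):
--     """Same return value as A, computed without simulating every bite.
--
--     Note: unlike A, this does not mutate `carrots`; the equivalence claimed
--     is about the return value only.
--     """
--     k = amount if amount > 1 else 1          # A always performs max(amount, 1) decrements
--     mx = max(carrots)
--
--     def deficit(L):
--         # number of decrements needed to cap every box at level L
--         t = 0
--         for x in carrots:
--             if x > L:
--                 t += x - L
--         return t
--
--     # binary search the level L of the k-th decrement: deficit(L) < k <= deficit(L-1)
--     lo, hi = mx - k, mx
--     while hi - lo > 1:
--         mid = (lo + hi) // 2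
--         if deficit(mid) < k:
--             hi = mid
--         else:
--             lo = mid
--     L = hi
--     r = k - deficit(L)
--     # the k-th decrement hits the r-th box (in index order) whose level reaches L
--     for i, x in enumerate(carrots):
--         if x >= L:
--             r -= 1
--             if r == 0:
--                 return i
--     return 0  # unreachable for non-empty carrots
-- ===== Notes on version B (the rewrite author's own statement) =====
-- stated objective: faster
-- what changed: Instead of simulating all max(amount,1) greedy single decrements with a max+index scan each, B binary-searches the final carrot level L with deficit(L) < k <= deficit(L-1) and resolves the k-th bite by one counting pass over the boxes.
import Mathlib
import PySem

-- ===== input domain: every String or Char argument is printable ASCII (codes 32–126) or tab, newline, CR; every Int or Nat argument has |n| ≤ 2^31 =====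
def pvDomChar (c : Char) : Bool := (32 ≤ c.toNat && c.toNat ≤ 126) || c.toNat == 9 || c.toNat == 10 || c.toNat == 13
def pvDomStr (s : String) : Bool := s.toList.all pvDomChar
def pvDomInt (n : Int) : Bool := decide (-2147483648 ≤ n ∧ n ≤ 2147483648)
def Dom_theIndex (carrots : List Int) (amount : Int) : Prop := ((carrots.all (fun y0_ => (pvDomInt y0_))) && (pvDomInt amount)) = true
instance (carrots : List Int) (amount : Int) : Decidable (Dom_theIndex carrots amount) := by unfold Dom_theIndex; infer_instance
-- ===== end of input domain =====

-- B replaces A's per-bite simulation (max+index scan per decrement) by a binary search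
-- for the final carrot level plus one counting pass; objective: faster.
-- A mutates its `carrots` argument in place, B does not: the equivalence proved here is
-- about the return value only.

-- ===== PORT A =====
-- one iteration of A's loop body: mostcarrots = carrots.index(max(carrots)); carrots[mostcarrots] -= 1
def pvStepA (c : List Int) : List Int × Int :=
  let m := (PySem.List.max? c id).getD 0
  let i := (PySem.List.index? c m).getD 0
  (PySem.List.pySetD c (i : Int) (PySem.List.pyGetD c (i : Int) 0 - 1), (i : Int))

def theIndex (carrots : List Int) (amount : Int) : Int :=
  let st := (PySem.List.pyRange 1 amount).foldl (fun (st : List Int × Int) _ => pvStepA st.1) (carrots, 0)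
  let st2 := (PySem.List.pyRange amount (amount + 1)).foldl (fun (st : List Int × Int) _ => pvStepA st.1) st
  st2.2

-- ===== PORT B =====
-- deficit(L) = number of decrements needed to cap every box at level L
def pvDeficit (carrots : List Int) (L : Int) : Int :=
  carrots.foldl (fun t x => if L < x then t + (x - L) else t) 0

-- binary search: largest L with deficit(L) < k (invariant: deficit(hi) < k <= deficit(lo));
-- the while loop is ported with a fuel argument (hi - lo iterations always suffice)
def pvBS (carrots : List Int) (k : Int) : Nat → Int → Int → Int
  | 0, _, hi => hi
  | fuel + 1, lo, hi =>
    if hi - lo ≤ 1 then hi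
    else
      let mid := PySem.Int.floordiv (lo + hi) 2
      if pvDeficit carrots mid < k then pvBS carrots k fuel lo mid
      else pvBS carrots k fuel mid hi

-- B's final loop: for i, x in enumerate(carrots): if x >= L: r -= 1; if r == 0: return i
def pvFind (L : Int) : List (Int × Int) → Int → Int
  | [], _ => 0
  | (i, x) :: t, r => if L ≤ x then (if r - 1 = 0 then i else pvFind L t (r - 1)) else pvFind L t r

def theIndex_alt (carrots : List Int) (amount : Int) : Int :=
  let k := if 1 < amount then amount else 1
  let mx := (PySem.List.max? carrots id).getD 0
  let L := pvBS carrots k (mx - (mx - k)).toNat (mx - k) mx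
  let r := k - pvDeficit carrots L
  pvFind L (PySem.List.enumerate carrots 0) r

-- ===== PRECONDITION & SPEC =====
-- Pre_ excludes only the empty list, on which A's max(carrots) raises ValueError.
def Pre_theIndex (carrots : List Int) (amount : Int) : Prop := carrots ≠ []
instance (carrots : List Int) (amount : Int) : Decidable (Pre_theIndex carrots amount) := by unfold Pre_theIndex; infer_instance
def pvWitness_theIndex : List Int × Int := ([3, 1], 2)

def Spec_theIndex (carrots : List Int) (amount : Int) (out : Int) : Prop := out = theIndex_alt carrots amount
instance (carrots : List Int) (amount : Int) (out : Int) : Decidable (Spec_theIndex carrots amount out) := by unfold Spec_theIndex; infer_instance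

-- ===== CLAIM (what is proved, stated in full; the proofs are below) =====
def Claim_equal_theIndex : Prop := ∀ (carrots : List Int) (amount : Int), Dom_theIndex carrots amount → Pre_theIndex carrots amount → Spec_theIndex carrots amount (theIndex carrots amount)

-- ===== LEMMAS AND PROOFS =====

-- total deficit, in sum form
def pvF (v : List Int) (L : Int) : Int := (v.map (fun x => max (x - L) 0)).sum
-- number of boxes with at least L carrots originally
def pvCnt (v : List Int) (L : Int) : Nat := v.countP (fun x => decide (L ≤ x))
-- canonical state after pvF v L + r greedy decrements (r < pvCnt v L):
-- boxes are capped at L, and the first r boxes ≥ L are already at L - 1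
def pvSig : List Int → Int → Nat → List Int
  | [], _, _ => []
  | x :: t, L, r =>
    if L ≤ x then
      match r with
      | 0 => L :: pvSig t L 0
      | r' + 1 => (L - 1) :: pvSig t L r'
    else x :: pvSig t L r
-- index of the r-th (1-based) box with original value ≥ L
def pvIdx : List Int → Int → Nat → Nat
  | [], _, _ => 0
  | x :: t, L, r =>
    if L ≤ x then
      match r with
      | 0 => 0
      | 1 => 0
      | r' + 2 => pvIdx t L (r' + 1) + 1
    else pvIdx t L r + 1
-- j-fold iteration of A's step
def pvIter (st : List Int × Int) : Nat → List Int × Int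
  | 0 => st
  | j + 1 => pvIter (pvStepA st.1) j

theorem pvF_nonneg (v : List Int) (L : Int) : 0 ≤ pvF v L := by
  induction v with
  | nil => simp [pvF]
  | cons x t ih => simp only [pvF, List.map_cons, List.sum_cons] at *; omega

theorem pvDeficit_aux (v : List Int) (L : Int) : ∀ a : Int,
    v.foldl (fun t x => if L < x then t + (x - L) else t) a = a + pvF v L := by
  induction v with
  | nil => intro a; simp [pvF]
  | cons x t ih =>
    intro a
    simp only [List.foldl_cons, pvF, List.map_cons, List.sum_cons]
    rw [ih]
    simp only [pvF]
    split_ifs with h <;> omega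

theorem pvDeficit_eq (v : List Int) (L : Int) : pvDeficit v L = pvF v L := by
  simpa using pvDeficit_aux v L 0

theorem pvF_antitone (v : List Int) {L L' : Int} (h : L ≤ L') : pvF v L' ≤ pvF v L := by
  induction v with
  | nil => simp [pvF]
  | cons x t ih => simp only [pvF, List.map_cons, List.sum_cons] at *; omega

theorem pvF_succ (v : List Int) (L : Int) : pvF v (L - 1) = pvF v L + pvCnt v L := by
  induction v with
  | nil => simp [pvF, pvCnt]
  | cons x t ih =>
    simp only [pvF, pvCnt, List.map_cons, List.sum_cons, List.countP_cons] at *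
    by_cases h : L ≤ x <;> simp [h] <;> omega

theorem pvCnt_antitone (v : List Int) {L L' : Int} (h : L ≤ L') : pvCnt v L' ≤ pvCnt v L := by
  unfold pvCnt
  exact List.countP_mono_left (fun a _ hq => by simp at *; omega)

theorem pvF_zero_of_le (v : List Int) (L : Int) (h : ∀ x ∈ v, x ≤ L) : pvF v L = 0 := by
  induction v with
  | nil => simp [pvF]
  | cons x t ih =>
    have h1 := h x (by simp)
    have h2 := ih (fun y hy => h y (by simp [hy]))
    simp only [pvF, List.map_cons, List.sum_cons] at *
    omega

theorem pvF_ge_of_mem (v : List Int) (L : Int) {x : Int} (hx : x ∈ v) : x - L ≤ pvF v L := by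
  induction v with
  | nil => simp at hx
  | cons y t ih =>
    have hn := pvF_nonneg t L
    simp only [List.mem_cons] at hx
    simp only [pvF, List.map_cons, List.sum_cons] at *
    rcases hx with h | h
    · subst h; omega
    · have := ih h; have : max (y - L) 0 ≥ 0 := le_max_right _ _; omega

theorem pvSig_self (v : List Int) (L : Int) (h : pvF v L = 0) : pvSig v L 0 = v := by
  induction v with
  | nil => rfl
  | cons x t ih =>
    have hn := pvF_nonneg t L
    simp only [pvF, List.map_cons, List.sum_cons] at h
    have hx : max (x - L) 0 = 0 := by
      have : 0 ≤ max (x - L) 0 := le_max_right _ _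
      have : pvF t L ≤ pvF t L := le_refl _
      simp only [pvF] at hn; omega
    have ht : pvF t L = 0 := by simp only [pvF] at hn ⊢; omega
    simp only [pvSig]
    by_cases hle : L ≤ x
    · have : x = L := by omega
      simp [ih ht, this]
    · simp [hle, ih ht]

theorem pvSig_cnt (v : List Int) (L : Int) : pvSig v L (pvCnt v L) = pvSig v (L - 1) 0 := by
  induction v with
  | nil => rfl
  | cons x t ih =>
    simp only [pvSig, pvCnt, List.countP_cons] at *
    by_cases hle : L ≤ x
    · have hle' : L - 1 ≤ x := by omega
      simp [hle, hle', ih]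
    · by_cases hle2 : L - 1 ≤ x
      · have : x = L - 1 := by omega
        simp [ih, this]
      · simp [hle, hle2, ih]

theorem pvSig_le (v : List Int) (L : Int) (r : Nat) : ∀ y ∈ pvSig v L r, y ≤ L := by
  induction v generalizing r with
  | nil => simp [pvSig]
  | cons x t ih =>
    intro y hy
    simp only [pvSig] at hy
    by_cases hle : L ≤ x
    · simp only [hle, if_true] at hy
      match r with
      | 0 => rcases List.mem_cons.1 hy with h | h; omega; exact ih 0 y h
      | r' + 1 => rcases List.mem_cons.1 hy with h | h; omega; exact ih r' y h
    · simp only [hle, if_false] at hy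
      rcases List.mem_cons.1 hy with h | h
      · omega
      · exact ih r y h

theorem pvSig_mem (v : List Int) (L : Int) (r : Nat) (h : r < pvCnt v L) : L ∈ pvSig v L r := by
  induction v generalizing r with
  | nil => simp [pvCnt] at h
  | cons x t ih =>
    simp only [pvCnt, List.countP_cons] at h
    simp only [pvSig]
    by_cases hle : L ≤ x
    · simp only [hle, if_true]
      match r with
      | 0 => exact List.mem_cons_self
      | r' + 1 =>
        simp [hle] at h
        exact List.mem_cons_of_mem _ (ih r' (by unfold pvCnt; omega))
    · simp only [hle, if_false]
      simp [hle] at h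
      exact List.mem_cons_of_mem _ (ih r (by unfold pvCnt; omega))

theorem pvSig_max? (v : List Int) (L : Int) (r : Nat) (h : r < pvCnt v L) :
    PySem.List.max? (pvSig v L r) id = some L := by
  have hmem := pvSig_mem v L r h
  have hne : pvSig v L r ≠ [] := by intro he; rw [he] at hmem; simp at hmem
  obtain ⟨m, hm⟩ : ∃ m, PySem.List.max? (pvSig v L r) id = some m := by
    cases hmx : PySem.List.max? (pvSig v L r) id with
    | none => exact absurd ((PySem.List.max?_eq_none_iff _ _).1 hmx) hne
    | some m => exact ⟨m, rfl⟩
  have h1 : m ≤ L := pvSig_le v L r m (PySem.List.max?_mem hm)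
  have h2 : L ≤ m := PySem.List.max?_isMax hm L hmem
  rw [hm]; congr 1; omega

theorem pvSig_cons_pos {x L : Int} {t : List Int} (hle : L ≤ x) (r' : Nat) :
    pvSig (x :: t) L (r' + 1) = (L - 1) :: pvSig t L r' := by simp [pvSig, hle]

theorem pvSig_cons_zero {x L : Int} {t : List Int} (hle : L ≤ x) :
    pvSig (x :: t) L 0 = L :: pvSig t L 0 := by simp [pvSig, hle]

theorem pvSig_cons_lt {x L : Int} {t : List Int} (hlt : ¬ L ≤ x) (r : Nat) :
    pvSig (x :: t) L r = x :: pvSig t L r := by simp [pvSig, hlt]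

theorem pvIdx_cons_one {x L : Int} {t : List Int} (hle : L ≤ x) :
    pvIdx (x :: t) L 1 = 0 := by simp [pvIdx, hle]

theorem pvIdx_cons_two {x L : Int} {t : List Int} (hle : L ≤ x) (r' : Nat) :
    pvIdx (x :: t) L (r' + 2) = pvIdx t L (r' + 1) + 1 := by simp [pvIdx, hle]

theorem pvIdx_cons_lt {x L : Int} {t : List Int} (hlt : ¬ L ≤ x) (r : Nat) :
    pvIdx (x :: t) L r = pvIdx t L r + 1 := by simp [pvIdx, hlt]

theorem pvSig_index? (v : List Int) (L : Int) (r : Nat) (h : r < pvCnt v L) :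
    PySem.List.index? (pvSig v L r) L = some (pvIdx v L (r + 1)) := by
  induction v generalizing r with
  | nil => simp [pvCnt] at h
  | cons x t ih =>
    simp only [pvCnt, List.countP_cons] at h
    by_cases hle : L ≤ x
    · match r with
      | 0 =>
        rw [pvSig_cons_zero hle, pvIdx_cons_one hle]
        exact PySem.List.index?_cons_self L _
      | r' + 1 =>
        simp [hle] at h
        rw [pvSig_cons_pos hle, pvIdx_cons_two hle]
        rw [PySem.List.index?_cons_of_ne _ (by omega : L - 1 ≠ L)]
        rw [ih r' (by unfold pvCnt; omega)]
        rfl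
    · simp [hle] at h
      rw [pvSig_cons_lt hle, pvIdx_cons_lt hle]
      rw [PySem.List.index?_cons_of_ne _ (by omega : x ≠ L)]
      rw [ih r (by unfold pvCnt; omega)]
      rfl

theorem pvSig_set (v : List Int) (L : Int) (r : Nat) (h : r < pvCnt v L) :
    (pvSig v L r).set (pvIdx v L (r + 1)) (L - 1) = pvSig v L (r + 1) := by
  induction v generalizing r with
  | nil => simp [pvCnt] at h
  | cons x t ih =>
    simp only [pvCnt, List.countP_cons] at h
    by_cases hle : L ≤ x
    · match r with
      | 0 => rw [pvSig_cons_zero hle, pvIdx_cons_one hle, pvSig_cons_pos hle]; simp [List.set]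
      | r' + 1 =>
        simp [hle] at h
        rw [pvSig_cons_pos hle, pvIdx_cons_two hle, pvSig_cons_pos hle]
        simp only [List.set]
        rw [ih r' (by unfold pvCnt; omega)]
    · simp [hle] at h
      rw [pvSig_cons_lt hle, pvIdx_cons_lt hle, pvSig_cons_lt hle]
      simp only [List.set]
      rw [ih r (by unfold pvCnt; omega)]

theorem pvIter_succ_back (st : List Int × Int) (j : Nat) :
    pvIter st (j + 1) = pvStepA (pvIter st j).1 := by
  induction j generalizing st with
  | zero => rfl
  | succ j ih => rw [pvIter, ih]; rfl

theorem pvFoldl_eq {β : Type} (l : List β) (st : List Int × Int) :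
    l.foldl (fun (st : List Int × Int) _ => pvStepA st.1) st = pvIter st l.length := by
  induction l generalizing st with
  | nil => rfl
  | cons b l ih => simp only [List.foldl_cons, List.length_cons, ih, pvIter]

theorem pvBS_correct (v : List Int) (k : Int) : ∀ (n : Nat) (lo hi : Int), (hi - lo).toNat ≤ n → lo < hi →
    pvF v hi < k → k ≤ pvF v lo → pvF v (pvBS v k n lo hi) < k ∧ k ≤ pvF v (pvBS v k n lo hi - 1) := by
  intro n
  induction n with
  | zero => intro lo hi hn hlt _ _; omega
  | succ n ih =>
    intro lo hi hn hlt hhi hlo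
    have hm : PySem.Int.floordiv (lo + hi) 2 = (lo + hi) / 2 :=
      PySem.Int.floordiv_eq_ediv_of_pos (by norm_num)
    by_cases h1 : hi - lo ≤ 1
    · have he : pvBS v k (n + 1) lo hi = hi := by rw [pvBS, if_pos h1]
      rw [he]
      have he2 : hi - 1 = lo := by omega
      rw [he2]; exact ⟨hhi, hlo⟩
    · by_cases h2 : pvDeficit v (PySem.Int.floordiv (lo + hi) 2) < k
      · have he : pvBS v k (n + 1) lo hi = pvBS v k n lo (PySem.Int.floordiv (lo + hi) 2) := by
          rw [pvBS, if_neg h1, if_pos h2]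
        rw [he]
        exact ih lo _ (by omega) (by omega) (by rw [pvDeficit_eq] at h2; exact h2) hlo
      · have he : pvBS v k (n + 1) lo hi = pvBS v k n (PySem.Int.floordiv (lo + hi) 2) hi := by
          rw [pvBS, if_neg h1, if_neg h2]
        rw [he]
        exact ih _ hi (by omega) (by omega) hhi (by rw [pvDeficit_eq] at h2; omega)

theorem pvFind_eq (v : List Int) (L : Int) : ∀ (r : Int) (s : Int), 1 ≤ r → r ≤ pvCnt v L →
    pvFind L (PySem.List.enumerate v s) r = s + pvIdx v L r.toNat := by
  induction v with
  | nil => intro r s h1 h2; simp [pvCnt] at h2; omega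
  | cons x t ih =>
    intro r s h1 h2
    simp only [pvCnt, List.countP_cons] at h2
    rw [PySem.List.enumerate_cons]
    by_cases hle : L ≤ x
    · simp only [pvFind, hle, if_true]
      by_cases hr : r - 1 = 0
      · have : r.toNat = 1 := by omega
        rw [if_pos hr, this, pvIdx_cons_one hle]; omega
      · rw [if_neg hr]
        have h2' : r - 1 ≤ (pvCnt t L : Int) := by simp [hle] at h2; unfold pvCnt; omega
        rw [ih (r - 1) (s + 1) (by omega) h2']
        have : r.toNat = (r - 1).toNat + 1 := by omega
        rw [this]
        obtain ⟨r', hr'⟩ : ∃ r', (r - 1).toNat = r' + 1 := ⟨(r - 1).toNat - 1, by omega⟩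
        rw [hr', pvIdx_cons_two hle, ← hr']
        push_cast; ring
    · simp only [pvFind, hle, if_false]
      have h2' : r ≤ (pvCnt t L : Int) := by simp [hle] at h2; unfold pvCnt; omega
      rw [ih r (s + 1) h1 h2', pvIdx_cons_lt hle]
      push_cast; ring

theorem pvUnique (v : List Int) {L L' : Int} {r r' : Nat}
    (h : pvF v L + r = pvF v L' + r') (h1 : r < pvCnt v L) (h2 : r' < pvCnt v L') : L = L' := by
  by_contra hne
  rcases lt_or_gt_of_ne hne with hlt | hlt
  · have hA : pvF v (L' - 1) ≤ pvF v L := pvF_antitone v (by omega)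
    have hB := pvF_succ v L'
    omega
  · have hA : pvF v (L - 1) ≤ pvF v L' := pvF_antitone v (by omega)
    have hB := pvF_succ v L
    omega

theorem pvStepA_sig (v : List Int) (L : Int) (r : Nat) (h : r < pvCnt v L) :
    pvStepA (pvSig v L r) = (pvSig v L (r + 1), (pvIdx v L (r + 1) : Int)) := by
  have hmax := pvSig_max? v L r h
  have hidx := pvSig_index? v L r h
  obtain ⟨hk, hget, -⟩ := PySem.List.getElem_of_index?_eq_some hidx
  simp only [pvStepA, hmax, hidx, Option.getD_some]
  rw [PySem.List.pySetD_natCast, PySem.List.pyGetD_natCast]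
  rw [List.getD_eq_getElem _ _ hk, hget, pvSig_set v L r h]

theorem pvCanon (v : List Int) (hv : v ≠ []) (j : Nat) :
    ∃ (L : Int) (r : Nat), pvF v L + r = j ∧ r < pvCnt v L ∧ (pvIter (v, 0) j).1 = pvSig v L r := by
  induction j with
  | zero =>
    obtain ⟨m, hm⟩ : ∃ m, PySem.List.max? v id = some m := by
      cases hmx : PySem.List.max? v id with
      | none => exact absurd ((PySem.List.max?_eq_none_iff _ _).1 hmx) hv
      | some m => exact ⟨m, rfl⟩
    have hle : ∀ x ∈ v, x ≤ m := fun x hx => PySem.List.max?_isMax hm x hx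
    have h0 : pvF v m = 0 := pvF_zero_of_le v m hle
    refine ⟨m, 0, by simp [h0], ?_, ?_⟩
    · have : 0 < pvCnt v m := by
        unfold pvCnt
        exact List.countP_pos_iff.2 ⟨m, PySem.List.max?_mem hm, by simp⟩
      omega
    · exact (pvSig_self v m h0).symm
  | succ j ih =>
    obtain ⟨L, r, h1, h2, h3⟩ := ih
    rw [pvIter_succ_back, h3, pvStepA_sig v L r h2]
    by_cases hc : r + 1 < pvCnt v L
    · exact ⟨L, r + 1, by push_cast; omega, hc, rfl⟩
    · have hcc : r + 1 = pvCnt v L := by omega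
      refine ⟨L - 1, 0, ?_, ?_, ?_⟩
      · rw [pvF_succ]; push_cast; omega
      · have := pvCnt_antitone v (by omega : L - 1 ≤ L); omega
      · simp only [hcc, pvSig_cnt]

-- ===== VERDICT (by name: the statement is the Claim_ definition above) =====
theorem theIndex_spec : Claim_equal_theIndex := by
  unfold Claim_equal_theIndex
  intro v amount _ hpre
  unfold Pre_theIndex at hpre
  unfold Spec_theIndex
  -- A performs (amount-1).toNat + 1 steps; the returned value is the index of the last step
  set j : Nat := (amount - 1).toNat with hj
  have hA : theIndex v amount = (pvIter (v, 0) (j + 1)).2 := by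
    simp only [theIndex]
    rw [pvFoldl_eq, pvFoldl_eq, PySem.List.length_pyRange_one, PySem.List.length_pyRange_one]
    have h1 : (amount + 1 - amount).toNat = 1 := by omega
    rw [h1, ← hj, pvIter_succ_back, pvIter_succ_back (v, 0) j]
    rfl
  obtain ⟨L, r, h1, h2, h3⟩ := pvCanon v hpre j
  have hAval : theIndex v amount = (pvIdx v L (r + 1) : Int) := by
    rw [hA, pvIter_succ_back, h3, pvStepA_sig v L r h2]
  -- B side
  obtain ⟨m, hm⟩ : ∃ m, PySem.List.max? v id = some m := by
    cases hmx : PySem.List.max? v id with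
    | none => exact absurd ((PySem.List.max?_eq_none_iff _ _).1 hmx) hpre
    | some m => exact ⟨m, rfl⟩
  simp only [theIndex_alt, hm, Option.getD_some]
  set k' : Int := if 1 < amount then amount else 1 with hk'
  have hk1 : 1 ≤ k' := by rw [hk']; split_ifs <;> omega
  have hkj : k' = (j : Int) + 1 := by rw [hk', hj]; split_ifs <;> omega
  have h0 : pvF v m = 0 := pvF_zero_of_le v m (fun x hx => PySem.List.max?_isMax hm x hx)
  have hlo : k' ≤ pvF v (m - k') := by
    have := pvF_ge_of_mem v (m - k') (PySem.List.max?_mem hm)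
    omega
  obtain ⟨hb1, hb2⟩ := pvBS_correct v k' (m - (m - k')).toNat (m - k') m le_rfl (by omega) (by omega) hlo
  set B : Int := pvBS v k' (m - (m - k')).toNat (m - k') m with hB
  rw [pvDeficit_eq]
  have hsucc := pvF_succ v B
  have hFnn := pvF_nonneg v B
  -- B's level and A's canonical level coincide
  have hBL : B = L := by
    apply pvUnique v (L' := L) (r := (k' - pvF v B - 1).toNat) (r' := r)
    · omega
    · omega
    · exact h2
  rw [hBL] at hb1 hb2 hsucc ⊢
  have hsuccL := pvF_succ v L
  have hcl : k' - pvF v L ≤ (pvCnt v L : Int) := by omega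
  rw [pvFind_eq v L (k' - pvF v L) 0 (by omega) hcl]
  have hrt : (k' - pvF v L).toNat = r + 1 := by omega
  rw [hrt, hAval]
  omega
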